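-- pv_equiv track=rewrite | github.com/LucasCerqueiraGalvao/documents_reader | src/stage_04_report/generate_report_exportation.py | expected_docs_rows
-- ===== SOURCE A (Python) =====
-- from typing import Any, Dict, List, Tuple
--
-- EXPECTED_DOC_KINDS = [
--     ("commercial_invoice", "COMMERCIAL INVOICE"),
--     ("packing_list", "PACKING LIST"),
--     ("draft_bl", "DRAFT BL"),
--     ("certificate_of_origin", "CERTIFICATE OF ORIGIN"),
--     ("container_data", "CONTAINER DATA"),
-- ]
--
-- def expected_docs_rows(stage02_docs: List[dict]) -> List[Tuple[str, int, str]]: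
--     counts: Dict[str, int] = {}
--     for d in stage02_docs:
--         k = ((d.get("doc_kind") or "") if isinstance(d, dict) else "")
--         k = str(k).strip().lower()
--         if not k:
--             continue
--         counts[k] = counts.get(k, 0) + 1
--     rows: List[Tuple[str, int, str]] = []
--     for k, label in EXPECTED_DOC_KINDS:
--         cnt = counts.get(k, 0)
--         status = "OK" if cnt > 0 else "MISSING"
--         rows.append((label, cnt, status))
--     return rows
-- ===== SOURCE B (Python) =====
-- from typing import List, Tuple
--
-- EXPECTED_DOC_KINDS = [
--     ("commercial_invoice", "COMMERCIAL INVOICE"),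
--     ("packing_list", "PACKING LIST"),
--     ("draft_bl", "DRAFT BL"),
--     ("certificate_of_origin", "CERTIFICATE OF ORIGIN"),
--     ("container_data", "CONTAINER DATA"),
-- ]
--
-- def _norm_kind(d) -> str:
--     k = ((d.get("doc_kind") or "") if isinstance(d, dict) else "")
--     return str(k).strip().lower()
--
-- def expected_docs_rows(stage02_docs: List[dict]) -> List[Tuple[str, int, str]]:
--     rows: List[Tuple[str, int, str]] = []
--     for k, label in EXPECTED_DOC_KINDS:
--         cnt = sum(1 for d in stage02_docs if _norm_kind(d) == k)
--         rows.append((label, cnt, "OK" if cnt > 0 else "MISSING"))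
--     return rows
-- ===== Notes on version B (the rewrite author's own statement) =====
-- stated objective: simpler
-- what changed: Drops the counts dictionary entirely: instead of one pass building a counter dict and then looking up each expected kind, B scans the documents once per expected kind and counts matching normalized doc_kind values directly.
import Mathlib
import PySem

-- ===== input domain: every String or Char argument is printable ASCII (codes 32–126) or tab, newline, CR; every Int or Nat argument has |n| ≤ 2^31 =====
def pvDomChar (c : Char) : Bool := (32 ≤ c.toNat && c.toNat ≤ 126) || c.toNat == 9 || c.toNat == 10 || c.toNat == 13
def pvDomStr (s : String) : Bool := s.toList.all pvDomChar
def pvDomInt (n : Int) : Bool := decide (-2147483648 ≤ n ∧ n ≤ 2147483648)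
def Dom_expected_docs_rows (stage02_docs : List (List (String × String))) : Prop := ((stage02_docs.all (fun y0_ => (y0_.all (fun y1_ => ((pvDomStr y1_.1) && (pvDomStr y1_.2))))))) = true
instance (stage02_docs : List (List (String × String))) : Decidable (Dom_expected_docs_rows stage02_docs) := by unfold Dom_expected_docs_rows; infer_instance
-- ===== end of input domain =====

-- B drops A's counts dictionary and instead counts matching documents per expected kind with a direct scan (simpler; same result).

-- shared normalization, identical in both Pythons: ((d.get("doc_kind") or "") ...).strip().lower()
-- dict.get = first-match lookup on the association list; 'x or ""' maps both None and "" to ""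
def pvNormKind (d : List (String × String)) : String :=
  PySem.Str.lower (PySem.Str.strip (((d.find? (fun p => p.1 == "doc_kind")).map (·.2)).getD ""))

def pvExpectedDocKinds : List (String × String) :=
  [("commercial_invoice", "COMMERCIAL INVOICE"),
   ("packing_list", "PACKING LIST"),
   ("draft_bl", "DRAFT BL"),
   ("certificate_of_origin", "CERTIFICATE OF ORIGIN"),
   ("container_data", "CONTAINER DATA")]

-- ===== PORT A =====
def expected_docs_rows (stage02_docs : List (List (String × String))) : List (String × Int × String) :=
  let counts : PySem.Dict String Int :=
    stage02_docs.foldl (fun c d =>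
      let k := pvNormKind d
      if k = "" then c else c.insert k (c.getD k 0 + 1)) PySem.Dict.empty
  pvExpectedDocKinds.foldl (fun rows kl =>
    let cnt := counts.getD kl.1 0
    rows ++ [(kl.2, cnt, if cnt > 0 then "OK" else "MISSING")]) []

-- ===== PORT B =====
def expected_docs_rows_alt (stage02_docs : List (List (String × String))) : List (String × Int × String) :=
  pvExpectedDocKinds.foldl (fun rows kl =>
    let cnt : Int := (stage02_docs.countP (fun d => pvNormKind d == kl.1) : Int)
    rows ++ [(kl.2, cnt, if cnt > 0 then "OK" else "MISSING")]) []

-- ===== PRECONDITION & SPEC =====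
def Spec_expected_docs_rows (stage02_docs : List (List (String × String))) (out : List (String × Int × String)) : Prop := out = expected_docs_rows_alt stage02_docs
instance (stage02_docs : List (List (String × String))) (out : List (String × Int × String)) : Decidable (Spec_expected_docs_rows stage02_docs out) := by unfold Spec_expected_docs_rows; infer_instance

-- ===== CLAIM (what is proved, stated in full; the proofs are below) =====
def Claim_equal_expected_docs_rows : Prop := ∀ (stage02_docs : List (List (String × String))), Dom_expected_docs_rows stage02_docs → Spec_expected_docs_rows stage02_docs (expected_docs_rows stage02_docs)

-- ===== LEMMAS AND PROOFS =====

-- A's counter loop, read at a nonempty key k, is exactly the per-kind count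
theorem pv_count_loop (l : List (List (String × String))) (c : PySem.Dict String Int)
    (k : String) (hk : k ≠ "") :
    (l.foldl (fun c d =>
      let k := pvNormKind d
      if k = "" then c else c.insert k (c.getD k 0 + 1)) c).getD k 0
      = c.getD k 0 + (l.countP (fun d => pvNormKind d == k) : Int) := by
  induction l generalizing c with
  | nil => simp
  | cons d t ih =>
    simp only [List.foldl_cons, List.countP_cons]
    by_cases h0 : pvNormKind d = ""
    · have hne : (pvNormKind d == k) = false := by
        simp [h0]; exact hk
      rw [if_pos h0, ih]; simp [hne]
    · rw [if_neg h0, ih]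
      by_cases hkk : k = pvNormKind d
      · subst hkk
        simp [PySem.Dict.getD_insert_self]
        ring
      · rw [PySem.Dict.getD_insert_of_ne (hne := hkk)]
        have : ¬ (pvNormKind d == k) = true := by
          simp; exact fun h => hkk h.symm
        simp [this]

theorem expected_docs_rows_eq (stage02_docs : List (List (String × String))) :
    expected_docs_rows stage02_docs = expected_docs_rows_alt stage02_docs := by
  unfold expected_docs_rows expected_docs_rows_alt pvExpectedDocKinds
  simp only [List.foldl_cons, List.foldl_nil]
  rw [pv_count_loop _ _ "commercial_invoice" (by decide),
      pv_count_loop _ _ "packing_list" (by decide),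
      pv_count_loop _ _ "draft_bl" (by decide),
      pv_count_loop _ _ "certificate_of_origin" (by decide),
      pv_count_loop _ _ "container_data" (by decide)]
  simp [PySem.Dict.getD_empty]

-- ===== VERDICT (by name: the statement is the Claim_ definition above) =====
theorem expected_docs_rows_spec : Claim_equal_expected_docs_rows := by
  intro docs _
  unfold Spec_expected_docs_rows
  exact expected_docs_rows_eq docs
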